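-- pv_equiv track=rewrite | github.com/S0NGMinHyuk/Algorithm-Coding-Test | 프로그래머스/2/60058. 괄호 변환/괄호 변환.py | dfs
-- ===== SOURCE A (Python) =====
-- def dfs(p):
--     # 입력이 빈 문자열일 경우, 빈 문자열을 반환
--     if p == "":
--         return p
--
--     count = 0
--     index = 0
--     while index < len(p):
--         count += 1 if p[index] == "(" else -1
--         if count == 0:  # 최초의 균형잡힌 괄호 문자열
--             index += 1
--             break
--         index += 1
--
--     u, v = p[:index], p[index:] # 문자열 p를 u와 v로 분할
--     if isPerfect(u):            # u가 올바른 괄호 문자열인 경우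
--         return u + dfs(v)
--     else:                       # u가 올바른 괄호 문자열이 아닌 경우
--         return "(" + dfs(v) + ")" + convert_U(u)
--
-- def isPerfect(u):
--     stack = []
--     for i in u:
--         if i == "(":
--             stack.append("(")
--         elif i == ")" and len(stack) > 0:
--             stack.pop()
--         else:
--             return False
--
--     return True
--
-- def convert_U(u):
--     answer = ""
--     for i in range(1, len(u)-1):
--         answer += "(" if u[i] == ")" else ")"
--     return answer
-- ===== SOURCE B (Python) =====
-- def _proper(u):
--     d = 0
--     for ch in u:
--         if ch == "(":
--             d += 1
--         elif ch == ")":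
--             if d == 0:
--                 return False
--             d -= 1
--         else:
--             return False
--     return True
--
--
-- def dfs(p):
--     out = []
--     tail = []
--     n = len(p)
--     s = 0
--     while s < n:
--         c = 0
--         i = s
--         while i < n:
--             c += 1 if p[i] == "(" else -1
--             i += 1
--             if c == 0:
--                 break
--         u = p[s:i]
--         s = i
--         if _proper(u):
--             out.append(u)
--         else:
--             out.append("(")
--             tail.append(")" + "".join("(" if ch == ")" else ")" for ch in u[1:-1]))
--     return "".join(out) + "".join(reversed(tail))
-- ===== Notes on version B (the rewrite author's own statement) =====
-- stated objective: alternative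
-- what changed: Replaced A's recursion that rebuilds strings by slicing and concatenation at every level with a single iterative index-based pass that collects prefix pieces and deferred suffix wrappers in lists and joins them once at the end.
import Mathlib
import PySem

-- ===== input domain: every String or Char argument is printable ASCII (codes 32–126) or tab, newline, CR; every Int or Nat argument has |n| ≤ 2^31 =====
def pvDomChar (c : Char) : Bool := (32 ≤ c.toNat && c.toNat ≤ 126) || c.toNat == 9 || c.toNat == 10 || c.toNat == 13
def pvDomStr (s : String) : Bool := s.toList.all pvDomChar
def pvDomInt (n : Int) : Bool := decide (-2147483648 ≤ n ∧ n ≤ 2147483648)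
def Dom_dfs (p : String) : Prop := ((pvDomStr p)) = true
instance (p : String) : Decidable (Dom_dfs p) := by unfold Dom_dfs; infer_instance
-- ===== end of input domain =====

-- B replaces A's recursive slice-and-concat with one iterative index-based pass that
-- segments the string and joins prefix/suffix piece lists at the end (objective: alternative).

-- ===== PORT A =====
-- A's while-loop scanning for the first balanced split point (count, index as in A)
def scanA (cs : List Char) (count : Int) (idx : Nat) : Nat :=
  match cs with
  | [] => idx
  | c :: rest =>
    if count + (if c = '(' then 1 else -1) = 0 then idx + 1
    else scanA rest (count + (if c = '(' then 1 else -1)) (idx + 1)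

-- idx only grows along the scan (cited by dfsA's decreasing_by)
theorem scanA_ge (cs : List Char) (count : Int) (idx : Nat) : idx ≤ scanA cs count idx := by
  induction cs generalizing count idx with
  | nil => simp [scanA]
  | cons c rest ih =>
    simp only [scanA]
    split <;> split
    all_goals first | omega | exact Nat.le_trans (by omega) (ih _ (idx + 1))

-- on a nonempty list the split point is at least idx + 1 (cited by dfsA's decreasing_by)
theorem scanA_ge_one (c : Char) (rest : List Char) (count : Int) (idx : Nat) :
    idx + 1 ≤ scanA (c :: rest) count idx := by
  simp only [scanA]
  split <;> split
  all_goals first | omega | exact scanA_ge rest _ (idx + 1)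

-- isPerfect: stack of "(" pushed/popped exactly as in A
def isPerfectGo (stack : List Char) (u : List Char) : Bool :=
  match u with
  | [] => true
  | c :: rest =>
    if c = '(' then isPerfectGo ('(' :: stack) rest
    else if c = ')' && decide (stack.length > 0) then isPerfectGo stack.tail rest
    else false

-- convert_U: range(1, len(u)-1) indexes exactly the middle chars u[1:-1]
def convertUA (u : List Char) : List Char :=
  ((u.drop 1).dropLast).foldl (fun acc ch => acc ++ [if ch = ')' then '(' else ')']) []

-- dfs on List Char (Python strings ported as char lists; slices p[:i]/p[i:] are take/drop, 0 ≤ i)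
def dfsA (p : List Char) : List Char :=
  match p with
  | [] => []
  | c :: rest =>
    if isPerfectGo [] ((c :: rest).take (scanA (c :: rest) 0 0))
    then (c :: rest).take (scanA (c :: rest) 0 0) ++ dfsA ((c :: rest).drop (scanA (c :: rest) 0 0))
    else '(' :: (dfsA ((c :: rest).drop (scanA (c :: rest) 0 0)) ++
                 ')' :: convertUA ((c :: rest).take (scanA (c :: rest) 0 0)))
termination_by p.length
decreasing_by
  all_goals
    rw [List.length_drop]
    exact Nat.sub_lt (Nat.succ_pos _) (Nat.lt_of_lt_of_le Nat.zero_lt_one (scanA_ge_one c rest 0 0))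

def dfs (p : String) : String := String.ofList (dfsA p.toList)

-- ===== PORT B =====
-- B's inner scan for the segment boundary: index i into the fixed string p, up to n
def scanB (p : List Char) (n : Nat) (c : Int) (i : Nat) : Nat :=
  if _h : i < n then
    if c + (if p.getD i ' ' = '(' then 1 else -1) = 0 then i + 1
    else scanB p n (c + (if p.getD i ' ' = '(' then 1 else -1)) (i + 1)
  else i
termination_by n - i
decreasing_by exact Nat.sub_succ_lt_self n i _h

-- the boundary never moves backwards (cited by dfsAltLoop's decreasing_by)
theorem scanB_ge (p : List Char) (n : Nat) (c : Int) (i : Nat) : i ≤ scanB p n c i := by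
  rw [scanB]
  split
  · split <;> split
    all_goals first | omega | exact Nat.le_trans (by omega) (scanB_ge p n _ (i + 1))
  · omega
termination_by n - i

-- if i < n the boundary advances strictly (cited by dfsAltLoop's decreasing_by)
theorem scanB_ge_one (p : List Char) (n : Nat) (c : Int) (i : Nat) (h : i < n) :
    i + 1 ≤ scanB p n c i := by
  rw [scanB]
  rw [dif_pos h]
  split <;> split
  all_goals first | omega | exact scanB_ge p n _ (i + 1)

-- B's _proper: running depth with an early exit, instead of A's stack
def properB (u : List Char) (d : Int) : Bool :=
  match u with
  | [] => true
  | ch :: rest =>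
    if ch = '(' then properB rest (d + 1)
    else if ch = ')' then (if d = 0 then false else properB rest (d - 1))
    else false

-- B's flipped middle: a map over u[1:-1]
def convB (u : List Char) : List Char :=
  ((u.drop 1).dropLast).map (fun ch => if ch = ')' then '(' else ')')

-- B's while loop: s = left edge of the unprocessed suffix, out/tail the joined piece lists
def dfsAltLoop (p : List Char) (n : Nat) (s : Nat) (out tail : List (List Char)) : List Char :=
  if _h : s < n then
    if properB ((p.drop s).take (scanB p n 0 s - s)) 0
    then dfsAltLoop p n (scanB p n 0 s) (out ++ [(p.drop s).take (scanB p n 0 s - s)]) tail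
    else dfsAltLoop p n (scanB p n 0 s) (out ++ [['(']])
           (tail ++ [(')' :: convB ((p.drop s).take (scanB p n 0 s - s)))])
  else out.flatten ++ tail.reverse.flatten
termination_by n - s
decreasing_by
  all_goals
    exact Nat.lt_of_le_of_lt (Nat.sub_le_sub_left (scanB_ge_one p n 0 s _h) n)
      (Nat.sub_succ_lt_self n s _h)

def dfs_alt (p : String) : String :=
  String.ofList (dfsAltLoop p.toList p.toList.length 0 [] [])

-- ===== PRECONDITION & SPEC =====
def Spec_dfs (p : String) (out : String) : Prop := out = dfs_alt p
instance (p : String) (out : String) : Decidable (Spec_dfs p out) := by unfold Spec_dfs; infer_instance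

-- ===== CLAIM (what is proved, stated in full; the proofs are below) =====
def Claim_equal_dfs : Prop := ∀ (p : String), Dom_dfs p → Spec_dfs p (dfs p)

-- ===== LEMMAS AND PROOFS =====

-- scanA shifts additively in its index accumulator
theorem scanA_shift (cs : List Char) (c : Int) (a idx : Nat) :
    scanA cs c (a + idx) = a + scanA cs c idx := by
  induction cs generalizing c idx with
  | nil => simp [scanA]
  | cons ch rest ih =>
    simp only [scanA]
    split <;> split
    all_goals first | omega | (rw [Nat.add_assoc]; exact ih _ (idx + 1))

-- scanB from i equals A's scan over the suffix p.drop i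
theorem scanB_eq (p : List Char) (c : Int) (i : Nat) :
    scanB p p.length c i = scanA (p.drop i) c i := by
  rw [scanB]
  split
  · rename_i h
    rw [List.drop_eq_getElem_cons h]
    simp only [scanA]
    rw [List.getD_eq_getElem _ _ h]
    split <;> split
    all_goals first | rfl | exact scanB_eq p _ (i + 1)
  · rename_i h
    rw [List.drop_eq_nil_of_le (by omega)]
    simp [scanA]
termination_by p.length - i
decreasing_by all_goals omega

-- A's stack-based isPerfect equals B's depth-based _proper (depth = stack length)
theorem proper_eq (u : List Char) (stack : List Char) :
    isPerfectGo stack u = properB u (stack.length : Int) := by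
  induction u generalizing stack with
  | nil => simp [isPerfectGo, properB]
  | cons ch rest ih =>
    simp only [isPerfectGo, properB]
    by_cases h1 : ch = '('
    · rw [if_pos h1, if_pos h1, ih ('(' :: stack)]
      simp only [List.length_cons]
      norm_cast
    · by_cases h2 : ch = ')'
      · subst h2
        cases stack with
        | nil => simp [h1]
        | cons x xs =>
          simp [ih xs]
          intro _
          omega
      · simp [h1, h2]

-- A's foldl-append convert_U equals B's map
theorem foldl_append_map (l : List Char) (f : Char → Char) (acc : List Char) :
    l.foldl (fun a ch => a ++ [f ch]) acc = acc ++ l.map f := by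
  induction l generalizing acc with
  | nil => simp
  | cons c rest ih => simp [ih]

theorem conv_eq (u : List Char) : convertUA u = convB u := by
  unfold convertUA convB
  exact foldl_append_map _ _ []

-- main invariant: B's loop from position s computes A's result on the suffix,
-- wrapped in the accumulated prefix/suffix pieces
theorem loop_eq (p : List Char) (s : Nat) (out tail : List (List Char)) :
    dfsAltLoop p p.length s out tail
      = out.flatten ++ dfsA (p.drop s) ++ tail.reverse.flatten := by
  rw [dfsAltLoop]
  split
  · rename_i h
    have hscan : scanB p p.length 0 s = scanA (p.drop s) 0 s := scanB_eq p 0 s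
    have hshift : scanA (p.drop s) 0 s = s + scanA (p.drop s) 0 0 := by
      have := scanA_shift (p.drop s) 0 s 0
      simpa using this
    obtain ⟨c, rest, hcr⟩ : ∃ c rest, p.drop s = c :: rest := by
      cases hd : p.drop s with
      | nil =>
        exfalso
        have := List.drop_eq_nil_iff.mp hd
        omega
      | cons c rest => exact ⟨c, rest, rfl⟩
    have hge : 1 ≤ scanA (p.drop s) 0 0 := by
      rw [hcr]; exact scanA_ge_one c rest 0 0
    set j := scanA (p.drop s) 0 0 with hj
    have hi : scanB p p.length 0 s = s + j := by rw [hscan, hshift]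
    have hdrop : (p.drop s).drop j = p.drop (s + j) := by
      rw [List.drop_drop]
    have hA : dfsA (p.drop s)
        = (if isPerfectGo [] ((p.drop s).take j)
           then (p.drop s).take j ++ dfsA (p.drop (s + j))
           else '(' :: (dfsA (p.drop (s + j)) ++ ')' :: convertUA ((p.drop s).take j))) := by
      conv_lhs => rw [hcr, dfsA]
      rw [← hcr, ← hj, hdrop]
    have hproper : isPerfectGo [] ((p.drop s).take j) = properB ((p.drop s).take j) 0 := by
      have := proper_eq ((p.drop s).take j) []
      simpa using this
    rw [hi]
    simp only [Nat.add_sub_cancel_left]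
    split
    · rename_i hb
      rw [loop_eq p (s + j) (out ++ [(p.drop s).take j]) tail]
      rw [hA, hproper, hb]
      simp
    · rename_i hb
      rw [loop_eq p (s + j) (out ++ [['(']]) (tail ++ [')' :: convB ((p.drop s).take j)])]
      rw [hA, hproper]
      simp only [Bool.not_eq_true] at hb
      rw [hb]
      simp [conv_eq]
  · rename_i h
    rw [List.drop_eq_nil_of_le (by omega)]
    simp [dfsA]
termination_by p.length - s
decreasing_by all_goals omega

-- ===== VERDICT (by name: the statement is the Claim_ definition above) =====
theorem dfs_spec : Claim_equal_dfs := by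
  intro p _
  unfold Spec_dfs dfs dfs_alt
  rw [loop_eq p.toList 0 [] []]
  simp
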